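-- pv_equiv track=rewrite | github.com/Zukasheucherebel1/Goa-HomeWorks | Day 68/Class Work/ClassWork.py | remove_url_anchor
-- ===== SOURCE A (Python) =====
-- def remove_url_anchor(url):
--     s = ""
--     for letter in url:
--         if letter != "#":
--             s += letter
--         else:
--             return s
--     return url
-- ===== SOURCE B (Python) =====
-- def remove_url_anchor(url):
--     return url.split('#', 1)[0]
-- ===== Notes on version B (the rewrite author's own statement) =====
-- stated objective: idiomatic
-- what changed: Replaced the character-by-character accumulation loop with early return by a single delimiter-bounded split: url.split('#', 1)[0].
import Mathlib
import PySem

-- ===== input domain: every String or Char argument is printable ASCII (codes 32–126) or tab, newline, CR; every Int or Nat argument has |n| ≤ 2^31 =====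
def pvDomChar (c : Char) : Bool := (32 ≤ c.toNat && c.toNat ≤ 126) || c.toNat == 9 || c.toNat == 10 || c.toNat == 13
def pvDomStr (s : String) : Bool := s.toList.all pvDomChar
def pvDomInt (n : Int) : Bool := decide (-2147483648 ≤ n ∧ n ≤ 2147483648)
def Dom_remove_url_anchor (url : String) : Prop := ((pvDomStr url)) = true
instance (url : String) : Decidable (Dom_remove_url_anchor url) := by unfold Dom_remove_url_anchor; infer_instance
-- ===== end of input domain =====

-- B replaces A's character-by-character accumulation loop (with early return at '#')
-- by a single delimiter-bounded split, url.split('#', 1)[0] — more idiomatic, same cost.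

-- ===== PORT A =====
-- the for-loop with its early return: 'some s' = the 'return s' inside the loop, none = loop completed
def pvA_loop (s : String) : List Char → Option String
  | [] => none
  | c :: rest => if c ≠ '#' then pvA_loop (s.push c) rest else some s

def remove_url_anchor (url : String) : String :=
  match pvA_loop "" url.toList with
  | some s => s
  | none => url

-- ===== PORT B =====
-- url.split('#', 1)[0]; the separator "#" is nonempty so splitMax? is 'some' of a nonempty list,
-- the unreachable fallback "" only totalises the match
def remove_url_anchor_alt (url : String) : String :=
  match PySem.Str.splitMax? url "#" 1 with
  | some (s :: _) => s
  | _ => ""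

-- ===== PRECONDITION & SPEC =====
def Spec_remove_url_anchor (url : String) (out : String) : Prop := out = remove_url_anchor_alt url
instance (url : String) (out : String) : Decidable (Spec_remove_url_anchor url out) := by unfold Spec_remove_url_anchor; infer_instance

-- ===== CLAIM (what is proved, stated in full; the proofs are below) =====
def Claim_equal_remove_url_anchor : Prop := ∀ (url : String), Dom_remove_url_anchor url → Spec_remove_url_anchor url (remove_url_anchor url)

-- ===== LEMMAS AND PROOFS =====

-- A's loop returns the accumulator extended by the prefix before the first '#', none if no '#'
theorem pvA_loop_eq (l : List Char) : ∀ (s : String),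
    pvA_loop s l = if '#' ∈ l then some (s ++ String.ofList (l.takeWhile (· ≠ '#'))) else none := by
  induction l with
  | nil => intro s; simp [pvA_loop]
  | cons c rest ih =>
    intro s
    by_cases hc : c = '#'
    · subst hc
      simp [pvA_loop, List.takeWhile]
    · have hc' : ¬ ('#' = c) := fun h => hc h.symm
      simp only [pvA_loop, List.takeWhile, List.mem_cons, hc, hc', ne_eq, not_false_eq_true,
        if_true, decide_not, false_or]
      rw [ih]
      split_ifs with h
      · simp [← String.toList_inj]
      · rfl

-- B's split-with-maxsplit-0 tail: dumps the remainder as one piece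
theorem go_zero (l : List Char) (acc : List (List Char)) (f : Nat) :
    PySem.Chars.splitOnMax.go ['#'] (f+1) 0 l [] acc = (l :: acc).reverse := by
  cases l <;> simp [PySem.Chars.splitOnMax.go]

-- B's split head is the prefix before the first '#'
theorem go_head (l : List Char) : ∀ (fuel : Nat) (cur : List Char) (acc : List (List Char)),
    l.length < fuel →
    ∃ rest, PySem.Chars.splitOnMax.go ['#'] fuel 1 l cur acc
      = acc.reverse ++ (cur.reverse ++ l.takeWhile (· ≠ '#')) :: rest := by
  induction l with
  | nil =>
    intro fuel cur acc h
    cases fuel with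
    | zero => omega
    | succ f => exact ⟨[], by simp [PySem.Chars.splitOnMax.go]⟩
  | cons c rest ih =>
    intro fuel cur acc h
    cases fuel with
    | zero => omega
    | succ f =>
    have hrest : rest.length < f := by simpa using Nat.lt_of_succ_lt_succ h
    by_cases hc : c = '#'
    · subst hc
      cases f with
      | zero => omega
      | succ f' =>
      refine ⟨[rest], ?_⟩
      simp [PySem.Chars.splitOnMax.go, List.isPrefixOf, go_zero, List.takeWhile]
    · obtain ⟨r, hr⟩ := ih f (c :: cur) acc hrest
      refine ⟨r, ?_⟩
      have hpre : (['#'] : List Char).isPrefixOf (c :: rest) = false := by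
        simp [List.isPrefixOf]; exact fun h => absurd h.symm hc
      simp only [PySem.Chars.splitOnMax.go, hpre, if_false, Nat.succ_ne_zero, hr,
        List.takeWhile]
      simp [hc]

-- ===== VERDICT (by name: the statement is the Claim_ definition above) =====
theorem remove_url_anchor_spec : Claim_equal_remove_url_anchor := by
  intro url _
  obtain ⟨r, hr⟩ := go_head url.toList (url.toList.length + 1) [] [] (Nat.lt_succ_self _)
  have hB : remove_url_anchor_alt url = String.ofList (url.toList.takeWhile (· ≠ '#')) := by
    unfold remove_url_anchor_alt
    simp only [PySem.Str.splitMax?, PySem.Chars.splitMax?]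
    rw [if_neg (by decide)]
    unfold PySem.Chars.splitOnMax
    rw [if_neg (by decide)]
    have hsep : ("#" : String).toList = ['#'] := rfl
    simp only [hsep, Int.toNat_one]
    rw [hr]
    simp
  unfold Spec_remove_url_anchor remove_url_anchor
  rw [pvA_loop_eq, hB]
  split_ifs with h
  · simp
  · have : url.toList.takeWhile (· ≠ '#') = url.toList := by
      rw [List.takeWhile_eq_self_iff]
      intro c hc
      have : c ≠ '#' := fun he => h (he ▸ hc)
      simp [this]
    rw [this, String.ofList_toList]
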